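-- pv_equiv track=rewrite | github.com/michelleduong03/TIP-Course | TIP-102/Dictionaries/session4.py | prioritize_observations
-- ===== SOURCE A (Python) =====
-- def prioritize_observations(observed_species, priority_species):
--     result = []
--
--     for species in priority_species:
--         for obs in observed_species:
--             if obs == species:
--                 result.append(obs)
--
--     extras = [obs for obs in observed_species if obs not in priority_species]
--
--     result.extend(sorted(extras))
--
--     return result
-- ===== SOURCE B (Python) =====
-- def prioritize_observations(observed_species, priority_species):
--     counts = {}
--     for o in observed_species:
--         counts[o] = counts.get(o, 0) + 1
--     result = []
--     for sp in priority_species: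
--         result.extend([sp] * counts.get(sp, 0))
--     pr = set(priority_species)
--     extras = [o for o in observed_species if o not in pr]
--     extras.sort()
--     result.extend(extras)
--     return result
-- ===== Notes on version B (the rewrite author's own statement) =====
-- stated objective: alternative
-- what changed: Counts observed species once in a dict and emits count copies per priority entry, replacing the nested priority-by-observed scan; the extras membership test uses a set instead of a list.
import Mathlib
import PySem

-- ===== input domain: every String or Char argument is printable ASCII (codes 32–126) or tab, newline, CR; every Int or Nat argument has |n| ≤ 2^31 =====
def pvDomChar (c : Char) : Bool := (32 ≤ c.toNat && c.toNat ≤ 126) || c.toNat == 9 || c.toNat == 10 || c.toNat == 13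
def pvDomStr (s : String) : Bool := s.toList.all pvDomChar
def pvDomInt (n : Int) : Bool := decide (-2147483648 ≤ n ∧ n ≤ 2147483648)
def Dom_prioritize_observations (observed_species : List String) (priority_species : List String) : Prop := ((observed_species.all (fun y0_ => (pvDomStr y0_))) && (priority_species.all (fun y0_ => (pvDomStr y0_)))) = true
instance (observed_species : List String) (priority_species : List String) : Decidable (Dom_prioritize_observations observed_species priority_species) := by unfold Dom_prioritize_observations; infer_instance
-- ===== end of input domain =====

-- B replaces A's nested priority-by-observed scan with a one-pass count dict (count copies per
-- priority entry) and a set membership test for the extras; return value is unchanged.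
-- ===== PORT A =====
def prioritize_observations (observed_species : List String) (priority_species : List String) : List String :=
  let result : List String :=
    priority_species.foldl (fun result species =>
      observed_species.foldl (fun result obs =>
        if obs == species then result ++ [obs] else result) result) []
  let extras : List String := observed_species.filter (fun obs => !(priority_species.contains obs))
  result ++ PySem.List.sorted extras (fun x => x) false

-- ===== PORT B =====
def prioritize_observations_alt (observed_species : List String) (priority_species : List String) : List String :=
  let counts : PySem.Dict String Int :=
    observed_species.foldl (fun d o => d.insert o (d.getD o 0 + 1)) PySem.Dict.empty
  let result : List String :=
    priority_species.foldl (fun result sp => result ++ List.replicate (counts.getD sp 0).toNat sp) []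
  let pr : PySem.Set String := PySem.Set.ofList priority_species
  let extras : List String :=
    PySem.List.sorted (observed_species.filter (fun o => !(PySem.Set.contains pr o))) (fun x => x) false
  result ++ extras

-- ===== PRECONDITION & SPEC =====
def Spec_prioritize_observations (observed_species : List String) (priority_species : List String) (out : List String) : Prop := out = prioritize_observations_alt observed_species priority_species
instance (observed_species : List String) (priority_species : List String) (out : List String) : Decidable (Spec_prioritize_observations observed_species priority_species out) := by unfold Spec_prioritize_observations; infer_instance

-- ===== CLAIM (what is proved, stated in full; the proofs are below) =====
def Claim_equal_prioritize_observations : Prop := ∀ (observed_species : List String) (priority_species : List String), Dom_prioritize_observations observed_species priority_species → Spec_prioritize_observations observed_species priority_species (prioritize_observations observed_species priority_species)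

-- ===== LEMMAS AND PROOFS =====

-- ===== VERDICT (by name: the statement is the Claim_ definition above) =====
theorem prioritize_observations_spec : Claim_equal_prioritize_observations := by
  intro observed priority _
  unfold Spec_prioritize_observations prioritize_observations prioritize_observations_alt
  simp only []
  congr 1
  · -- priority part: both folds agree step by step
    apply PySem.List.foldl_congr_mem
    intro acc sp _
    rw [PySem.List.foldl_append_if_eq_filter]
    rw [PySem.Dict.getD_foldl_insert_add_one, PySem.Dict.getD_empty]
    simp [List.filter_beq]
  · -- extras: same filtered list, membership via the set
    congr 1
    apply List.filter_congr
    intro o _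
    simp [PySem.Set.contains, PySem.Set.mem_ofList]
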